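-- pv_equiv track=rewrite | github.com/cys4585/algorithm_study | baekjoon/2661_좋은수열/2661.py | is_good_sequence
-- ===== SOURCE A (Python) =====
-- def is_good_sequence(seq):
--     r = len(seq)
--     # 뒤에 2개, 4개, 6개, ... 순으로 조사한다.
--     # left right로 나눠 비교한다.
--     l = r - 2
--     while l >= 0:
--         mid = (l + r) // 2
--         left = seq[l:mid]
--         right = seq[mid:r]
--         if left == right: return False
--         l -= 2
--     return True
-- ===== SOURCE B (Python) =====
-- def is_good_sequence(seq):
--     # Z-function of the reversed string: suffix of length 2k is two equal
--     # halves iff z[k] >= k on the reverse. O(n) instead of A's O(n^2).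
--     t = seq[::-1]
--     n = len(t)
--     z = [0] * n
--     l = r = 0
--     for i in range(1, n):
--         zi = 0
--         if i < r:
--             zi = min(r - i, z[i - l])
--         while i + zi < n and t[zi] == t[i + zi]:
--             zi += 1
--         z[i] = zi
--         if i + zi > r:
--             l, r = i, i + zi
--     return all(z[k] < k for k in range(1, n // 2 + 1))
-- ===== Notes on version B (the rewrite author's own statement) =====
-- stated objective: faster
-- what changed: Replaces A's per-suffix slice comparison (every even-length suffix split in half and compared, O(n^2)) with a single Z-function pass over the reversed string, testing each half-length k via z[k] >= k.
import Mathlib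
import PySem

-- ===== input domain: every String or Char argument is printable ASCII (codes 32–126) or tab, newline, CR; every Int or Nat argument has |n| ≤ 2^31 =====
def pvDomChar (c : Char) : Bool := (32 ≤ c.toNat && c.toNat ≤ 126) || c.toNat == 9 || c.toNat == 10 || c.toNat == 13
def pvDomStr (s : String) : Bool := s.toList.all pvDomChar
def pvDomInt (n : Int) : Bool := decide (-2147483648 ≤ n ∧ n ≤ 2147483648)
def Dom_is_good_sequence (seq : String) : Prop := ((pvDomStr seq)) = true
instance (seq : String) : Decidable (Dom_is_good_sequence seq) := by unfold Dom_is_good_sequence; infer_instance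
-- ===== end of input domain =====

-- B replaces A's O(n^2) slice-comparison of every even-length suffix's halves by a single
-- Z-function pass over the reversed string (that suffix is two equal halves of length k
-- iff z[k] >= k on the reverse); same return value on every input.

-- ===== PORT A =====
-- A's while loop: l decreases by 2 until it goes negative
def pvALoop (cs : List Char) (r : Int) (l : Int) : Bool :=
  if _h : 0 ≤ l then
    let mid := PySem.Int.floordiv (l + r) 2
    let left := PySem.List.slice cs (some l) (some mid)
    let right := PySem.List.slice cs (some mid) (some r)
    if left = right then false else pvALoop cs r (l - 2)
  else true
termination_by (l + 2).toNat
decreasing_by omega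

def is_good_sequence (seq : String) : Bool :=
  let cs := seq.toList
  pvALoop cs (cs.length : Int) ((cs.length : Int) - 2)

-- ===== PORT B =====
-- B's inner while loop, extending zi while characters match (the loop only runs with
-- i >= 1, so i + z < n already keeps both getD indexes in range: getD is exact here)
def pvZExt (t : List Char) (i : Nat) (z : Nat) : Nat :=
  if _h : i + z < t.length ∧ t.getD z ' ' = t.getD (i + z) ' ' then pvZExt t i (z + 1)
  else z
termination_by t.length - (i + z)
decreasing_by omega

-- one iteration of B's for loop over the state (z array, l, r)
def pvZStep (t : List Char) (st : List Nat × Nat × Nat) (i : Nat) : List Nat × Nat × Nat :=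
  let z := st.1
  let l := st.2.1
  let r := st.2.2
  let zi0 := if i < r then min (r - i) (z.getD (i - l) 0) else 0
  let zi := pvZExt t i zi0
  let z' := z.set i zi
  if r < i + zi then (z', i, i + zi) else (z', l, r)

def is_good_sequence_alt (seq : String) : Bool :=
  let t := seq.toList.reverse
  let n := t.length
  let st := (List.range' 1 (n - 1)).foldl (pvZStep t) (List.replicate n 0, 0, 0)
  (List.range' 1 (n / 2)).all (fun k => decide (st.1.getD k 0 < k))

-- ===== PRECONDITION & SPEC =====
def Spec_is_good_sequence (seq : String) (out : Bool) : Prop := out = is_good_sequence_alt seq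
instance (seq : String) (out : Bool) : Decidable (Spec_is_good_sequence seq out) := by unfold Spec_is_good_sequence; infer_instance

-- ===== CLAIM (what is proved, stated in full; the proofs are below) =====
def Claim_equal_is_good_sequence : Prop := ∀ (seq : String), Dom_is_good_sequence seq → Spec_is_good_sequence seq (is_good_sequence seq)

-- ===== LEMMAS AND PROOFS =====

def pvLcp : List Char → List Char → Nat
  | a :: as, b :: bs => if a = b then pvLcp as bs + 1 else 0
  | _, _ => 0

lemma pvLcp_nil_right : ∀ (x : List Char), pvLcp x [] = 0 := by
  intro x; cases x <;> rfl

lemma pvLcp_le_right : ∀ (x y : List Char), pvLcp x y ≤ y.length := by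
  intro x
  induction x with
  | nil => intro y; cases y <;> simp [pvLcp]
  | cons a as ih =>
    intro y; cases y with
    | nil => simp [pvLcp_nil_right]
    | cons b bs =>
      simp only [pvLcp]
      split_ifs with h
      · have := ih bs; simp; omega
      · simp

lemma take_eq_of_le_pvLcp : ∀ (x y : List Char) (k : Nat), k ≤ pvLcp x y →
    x.take k = y.take k := by
  intro x
  induction x with
  | nil => intro y k h; cases y <;> simp_all [pvLcp]
  | cons a as ih =>
    intro y k h
    cases y with
    | nil => simp [pvLcp_nil_right] at h; simp [h]
    | cons b bs =>
      simp only [pvLcp] at h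
      split_ifs at h with hab
      · cases k with
        | zero => simp
        | succ k' => subst hab; simp [List.take_succ_cons]; exact ih bs k' (by omega)
      · interval_cases k; simp

lemma le_pvLcp_of_take_eq : ∀ (x y : List Char) (k : Nat), k ≤ x.length → k ≤ y.length →
    x.take k = y.take k → k ≤ pvLcp x y := by
  intro x
  induction x with
  | nil => intro y k h _ _; simp at h; omega
  | cons a as ih =>
    intro y k hx hy ht
    cases y with
    | nil => simp at hy; omega
    | cons b bs =>
      cases k with
      | zero => omega
      | succ k' =>
        simp [List.take_succ_cons] at ht
        obtain ⟨hab, ht'⟩ := ht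
        simp only [pvLcp, if_pos hab]
        have := ih bs k' (by simpa using hx) (by simpa using hy) ht'
        omega

lemma pvLcp_drop : ∀ (k : Nat) (x y : List Char), k ≤ pvLcp x y →
    pvLcp x y = k + pvLcp (x.drop k) (y.drop k) := by
  intro k
  induction k with
  | zero => simp
  | succ k' ih =>
    intro x y h
    cases x with
    | nil => cases y <;> simp_all [pvLcp]
    | cons a as =>
      cases y with
      | nil => simp [pvLcp_nil_right] at h
      | cons b bs =>
        simp only [pvLcp] at h ⊢
        split_ifs at h ⊢ with hab
        · have := ih as bs (by omega)
          simp [List.drop_succ_cons]; omega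
        · omega
lemma pvZExt_eq_aux (t : List Char) (i : Nat) (hi : 1 ≤ i) : ∀ (m b : Nat), t.length - (i + b) ≤ m →
    pvZExt t i b = b + pvLcp (t.drop b) (t.drop (i + b)) := by
  intro m
  induction m with
  | zero =>
    intro b hm
    have hge : t.length ≤ i + b := by omega
    rw [pvZExt]
    rw [dif_neg (by omega)]
    have : t.drop (i + b) = [] := List.drop_eq_nil_of_le hge
    simp [this, pvLcp_nil_right]
  | succ m' ih =>
    intro b hm
    by_cases hlt : i + b < t.length
    · have hb : b < t.length := by omega
      have hd1 : t.drop b = t[b] :: t.drop (b + 1) := List.drop_eq_getElem_cons hb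
      have hd2 : t.drop (i + b) = t[i + b] :: t.drop (i + b + 1) := List.drop_eq_getElem_cons hlt
      have hg1 : t.getD b ' ' = t[b] := List.getD_eq_getElem t ' ' hb
      have hg2 : t.getD (i + b) ' ' = t[i + b] := List.getD_eq_getElem t ' ' hlt
      rw [pvZExt]
      by_cases heq : t[b] = t[i + b]
      · rw [dif_pos ⟨hlt, by rw [hg1, hg2, heq]⟩]
        rw [ih (b + 1) (by omega)]
        rw [hd1, hd2]
        simp only [pvLcp, if_pos heq]
        have : i + (b + 1) = i + b + 1 := by omega
        rw [this]
        omega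
      · rw [dif_neg (by rw [hg1, hg2]; exact fun h => heq h.2)]
        rw [hd1, hd2]
        simp [pvLcp, if_neg heq]
    · rw [pvZExt, dif_neg (by omega)]
      have : t.drop (i + b) = [] := List.drop_eq_nil_of_le (by omega)
      simp [this, pvLcp_nil_right]

lemma pvZExt_eq (t : List Char) (i : Nat) (hi : 1 ≤ i) (b : Nat) :
    pvZExt t i b = b + pvLcp (t.drop b) (t.drop (i + b)) :=
  pvZExt_eq_aux t i hi (t.length - (i + b)) b le_rfl
def pvInv (t : List Char) (i : Nat) (st : List Nat × Nat × Nat) : Prop :=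
  st.1.length = t.length ∧
  (∀ j, 1 ≤ j → j < i → st.1.getD j 0 = pvLcp t (t.drop j)) ∧
  st.2.1 < i ∧ st.2.2 ≤ t.length ∧ st.2.2 - st.2.1 ≤ pvLcp t (t.drop st.2.1) ∧
  (st.2.1 = 0 → st.2.2 = 0)

lemma pvZStep_zi (t : List Char) (i : Nat) (hi : 1 ≤ i) (st : List Nat × Nat × Nat)
    (h : pvInv t i st) :
    pvZExt t i (if i < st.2.2 then min (st.2.2 - i) (st.1.getD (i - st.2.1) 0) else 0) =
      pvLcp t (t.drop i) := by
  obtain ⟨hlen, hz, hli, hrn, hwin, hl0⟩ := h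
  set l := st.2.1 with hl
  set r := st.2.2 with hr
  set zi0 := (if i < r then min (r - i) (st.1.getD (i - l) 0) else 0) with hzi0
  have hle : zi0 ≤ pvLcp t (t.drop i) := by
    by_cases hir : i < r
    · have hl1 : 1 ≤ l := by
        rcases Nat.eq_zero_or_pos l with h0 | h1
        · exfalso; have := hl0 h0; omega
        · exact h1
      have hil : 1 ≤ i - l := by omega
      have hili : i - l < i := by omega
      have hzl : st.1.getD (i - l) 0 = pvLcp t (t.drop (i - l)) := hz _ hil hili
      have hzi0v : zi0 = min (r - i) (pvLcp t (t.drop (i - l))) := by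
        rw [hzi0, if_pos hir, hzl]
      -- (a) take zi0 t = take zi0 (drop (i-l) t)
      have ha : t.take zi0 = (t.drop (i - l)).take zi0 :=
        take_eq_of_le_pvLcp t (t.drop (i - l)) zi0 (by omega)
      -- window: take (r-l) t = take (r-l) (drop l t)
      have hw : t.take (r - l) = (t.drop l).take (r - l) :=
        take_eq_of_le_pvLcp t (t.drop l) (r - l) hwin
      -- (b) take (r-i) (drop (i-l) t) = take (r-i) (drop i t)
      have hb : (t.drop (i - l)).take (r - i) = (t.drop i).take (r - i) := by
        have h1 := congrArg (List.drop (i - l)) hw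
        rw [List.drop_take, List.drop_take, List.drop_drop] at h1
        have e1 : r - l - (i - l) = r - i := by omega
        have e2 : l + (i - l) = i := by omega
        rw [e1, e2] at h1
        exact h1
      have hc : t.take zi0 = (t.drop i).take zi0 := by
        have h2 := congrArg (List.take zi0) hb
        rw [List.take_take, List.take_take] at h2
        have e3 : min zi0 (r - i) = zi0 := by omega
        rw [e3] at h2
        rw [ha, h2]
      exact le_pvLcp_of_take_eq t (t.drop i) zi0 (by omega)
        (by simp [List.length_drop]; omega) hc
    · simp [hzi0, if_neg hir]
  rw [pvZExt_eq t i hi zi0]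
  have := pvLcp_drop zi0 t (t.drop i) hle
  rw [List.drop_drop] at this
  omega

lemma pvInv_step (t : List Char) (i : Nat) (hi : 1 ≤ i) (hin : i < t.length)
    (st : List Nat × Nat × Nat) (h : pvInv t i st) : pvInv t (i + 1) (pvZStep t st i) := by
  have hzi := pvZStep_zi t i hi st h
  obtain ⟨hlen, hz, hli, hrn, hwin, hl0⟩ := h
  set Z := pvLcp t (t.drop i) with hZ
  have hZle : Z ≤ t.length - i := by
    have := pvLcp_le_right t (t.drop i)
    simp [List.length_drop] at this
    omega
  set zi := pvZExt t i (if i < st.2.2 then min (st.2.2 - i) (st.1.getD (i - st.2.1) 0) else 0) with hzidef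
  simp only [pvZStep]
  rw [← hzidef]
  have hget : ∀ j, (st.1.set i zi).getD j 0 = if j = i then zi else st.1.getD j 0 := by
    intro j
    by_cases hji : j = i
    · rw [hji, if_pos rfl]
      have hs : (st.1.set i zi)[i]? = some zi := List.getElem?_set_self (by omega)
      simp [List.getD_eq_getElem?_getD, hs]
    · rw [if_neg hji]
      have hs : (st.1.set i zi)[j]? = st.1[j]? := List.getElem?_set_ne (fun h => hji h.symm)
      simp [List.getD_eq_getElem?_getD, hs]
  split_ifs with hcond
  · refine ⟨by simp [hlen], ?_, by dsimp only; omega, by dsimp only; omega, ?_, by dsimp only; omega⟩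
    · intro j hj1 hji
      rw [hget j]
      by_cases hje : j = i
      · subst hje; simp [hzi]; exact hZ
      · rw [if_neg hje]; exact hz j hj1 (by omega)
    · dsimp only
      rw [hzi]
      omega
  · refine ⟨by simp [hlen], ?_, by dsimp only; omega, by dsimp only; omega, by dsimp only; exact hwin, by dsimp only; omega⟩
    intro j hj1 hji
    rw [hget j]
    by_cases hje : j = i
    · subst hje; simp [hzi]; exact hZ
    · rw [if_neg hje]; exact hz j hj1 (by omega)

lemma pvInv_fold (t : List Char) : ∀ (m : Nat), m ≤ t.length - 1 →
    pvInv t (1 + m) ((List.range' 1 m).foldl (pvZStep t) (List.replicate t.length 0, 0, 0)) := by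
  intro m
  induction m with
  | zero =>
    intro _
    simp only [List.range'_zero, List.foldl_nil]
    exact ⟨by simp, by intro j h1 h2; omega, by dsimp only; omega, by dsimp only; omega, by simp, by intro _; rfl⟩
  | succ m' ih =>
    intro hm
    rw [List.range'_1_concat, List.foldl_append, List.foldl_cons, List.foldl_nil]
    have h1 : pvInv t (1 + m' + 1) (pvZStep t ((List.range' 1 m').foldl (pvZStep t) (List.replicate t.length 0, 0, 0)) (1 + m')) :=
      pvInv_step t (1 + m') (by omega) (by omega) _ (ih (by omega))
    have e : 1 + (m' + 1) = 1 + m' + 1 := by omega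
    rw [e]
    exact h1

def pvBad (cs : List Char) (r i : Int) : Prop :=
  PySem.List.slice cs (some i) (some (PySem.Int.floordiv (i + r) 2)) =
    PySem.List.slice cs (some (PySem.Int.floordiv (i + r) 2)) (some r)

lemma pvALoop_iff_aux (cs : List Char) (r : Int) : ∀ (n : Nat) (l : Int), (l + 2).toNat ≤ n →
    (pvALoop cs r l = true ↔ ∀ k : Nat, 0 ≤ l - 2 * k → ¬ pvBad cs r (l - 2 * k)) := by
  intro n
  induction n with
  | zero =>
    intro l hm
    rw [pvALoop, dif_neg (by omega)]
    constructor
    · intro _ k hk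
      exact absurd hk (by omega)
    · intro _; rfl
  | succ n' ih =>
    intro l hm
    by_cases hl : 0 ≤ l
    · rw [pvALoop, dif_pos hl]
      dsimp only
      split_ifs with hbad
      · constructor
        · intro h; exact absurd h (by simp)
        · intro hall
          have h0 := hall 0 (by omega)
          have e : l - 2 * ((0 : Nat) : Int) = l := by push_cast; ring
          rw [e] at h0
          exact absurd (by unfold pvBad; exact hbad) h0
      · rw [ih (l - 2) (by omega)]
        constructor
        · intro hall k hk
          cases k with
          | zero =>
            have e : l - 2 * ((0 : Nat) : Int) = l := by push_cast; ring
            rw [e]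
            intro hb
            exact hbad (by unfold pvBad at hb; exact hb)
          | succ k' =>
            have h1 := hall k' (by push_cast at hk ⊢; omega)
            have e : l - 2 - 2 * ((k' : Nat) : Int) = l - 2 * (((k' + 1 : Nat)) : Int) := by
              push_cast; ring
            rwa [e] at h1
        · intro hall k hk
          have h1 := hall (k + 1) (by push_cast at hk ⊢; omega)
          have e : l - 2 * (((k + 1 : Nat)) : Int) = l - 2 - 2 * ((k : Nat) : Int) := by
            push_cast; ring
          rwa [e] at h1
    · rw [pvALoop, dif_neg hl]
      constructor
      · intro _ k hk
        exact absurd hk (by omega)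
      · intro _; rfl

lemma pvALoop_iff (cs : List Char) (r l : Int) :
    (pvALoop cs r l = true ↔ ∀ k : Nat, 0 ≤ l - 2 * k → ¬ pvBad cs r (l - 2 * k)) :=
  pvALoop_iff_aux cs r (l + 2).toNat l le_rfl

lemma pvKey (cs : List Char) (k : Nat) (hk1 : 1 ≤ k) (hk2 : 2 * k ≤ cs.length) :
    (¬ pvBad cs (cs.length : Int) ((cs.length : Int) - 2 * (k : Int)) ↔
      pvLcp cs.reverse (cs.reverse.drop k) < k) := by
  set n := cs.length with hn
  have e1 : (n : Int) - 2 * (k : Int) = (((n - 2 * k : Nat)) : Int) := by omega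
  have e2 : (((n - 2 * k : Nat)) : Int) + (n : Int) = (((2 * (n - k) : Nat)) : Int) := by
    push_cast; omega
  have e3 : PySem.Int.floordiv (((2 * (n - k) : Nat)) : Int) 2 = (((n - k : Nat)) : Int) := by
    have h2 : ((2 : Nat) : Int) = (2 : Int) := by norm_num
    rw [← h2, PySem.Int.floordiv_natCast]
    congr 1
    omega
  have hbad : pvBad cs (n : Int) ((n : Int) - 2 * (k : Int)) ↔
      ((cs.drop (n - 2 * k)).take k = cs.drop (n - k)) := by
    unfold pvBad
    rw [e1, e2, e3, PySem.List.slice_natCast, PySem.List.slice_natCast]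
    have e4 : n - k - (n - 2 * k) = k := by omega
    have e5 : n - (n - k) = k := by omega
    rw [e4, e5]
    have e6 : (cs.drop (n - k)).take k = cs.drop (n - k) :=
      List.take_of_length_le (by simp only [List.length_drop]; omega)
    rw [e6]
  rw [hbad]
  -- transport to the reverse
  have hrev : ((cs.drop (n - 2 * k)).take k = cs.drop (n - k)) ↔
      (cs.reverse.take k = (cs.reverse.drop k).take k) := by
    have h1 : cs.reverse.take k = (cs.drop (n - k)).reverse := by
      rw [List.take_reverse]
    have h2 : (cs.reverse.drop k).take k = ((cs.drop (n - 2 * k)).take k).reverse := by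
      rw [List.drop_reverse, List.take_reverse, List.length_take]
      have ea : min (cs.length - k) cs.length - k = n - 2 * k := by omega
      rw [ea, List.drop_take]
      have eb : cs.length - k - (n - 2 * k) = k := by omega
      rw [eb]
    rw [h1, h2]
    rw [← List.reverse_inj]
    constructor
    · intro h; rw [h]
    · intro h; rw [← List.reverse_inj] at h; simpa using h.symm
  rw [hrev]
  -- lcp test
  have hlen : cs.reverse.length = n := by simp [hn]
  constructor
  · intro hne
    by_contra hge
    have hge' : k ≤ pvLcp cs.reverse (cs.reverse.drop k) := by omega
    exact hne (take_eq_of_le_pvLcp cs.reverse (cs.reverse.drop k) k hge')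
  · intro hlt hte
    have := le_pvLcp_of_take_eq cs.reverse (cs.reverse.drop k) k (by omega)
      (by simp only [List.length_drop, hlen]; omega) hte
    omega

-- ===== VERDICT (by name: the statement is the Claim_ definition above) =====
theorem is_good_sequence_spec : Claim_equal_is_good_sequence := by
  intro seq _
  unfold Spec_is_good_sequence
  unfold is_good_sequence is_good_sequence_alt
  set cs := seq.toList with hcs
  set t := cs.reverse with ht
  have htlen : t.length = cs.length := by simp [ht]
  obtain ⟨_, hz, _⟩ := pvInv_fold t (t.length - 1) le_rfl
  rw [Bool.eq_iff_iff, pvALoop_iff, List.all_eq_true]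
  constructor
  · intro hA k hk
    rw [List.mem_range'_1] at hk
    rw [htlen] at hk
    have hk2 : 2 * k ≤ cs.length := by omega
    have hkt : k < 1 + (t.length - 1) := by omega
    rw [decide_eq_true_iff, hz k (by omega) hkt, ht]
    rw [← pvKey cs k (by omega) hk2]
    have h1 := hA (k - 1) (by omega)
    have e : (cs.length : Int) - 2 - 2 * ((k - 1 : Nat) : Int) = (cs.length : Int) - 2 * (k : Int) := by
      push_cast [Nat.cast_sub (by omega : 1 ≤ k)]; ring
    rwa [e] at h1
  · intro hB j hj
    have hk2 : 2 * (j + 1) ≤ cs.length := by omega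
    have h1 := hB (j + 1) (by rw [List.mem_range'_1, htlen]; omega)
    rw [decide_eq_true_iff, hz (j + 1) (by omega) (by omega), ht] at h1
    rw [← pvKey cs (j + 1) (by omega) hk2] at h1
    have e : (cs.length : Int) - 2 - 2 * (j : Int) = (cs.length : Int) - 2 * ((j + 1 : Nat) : Int) := by
      push_cast; ring
    rwa [e]
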